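-- pv_equiv track=rewrite | github.com/bferguson-dev/Loadout | .github/scripts/validate-manifest.py | check_duplicate_ids
-- ===== SOURCE A (Python) =====
-- def check_duplicate_ids(apps):
--     errors = []
--     seen = {}
--     for i, app in enumerate(apps):
--         app_id = app.get("id", f"<missing id at index {i}>")
--         if app_id in seen:
--             errors.append(
--                 f"Duplicate app ID '{app_id}' at index {i} (first seen at {seen[app_id]})"
--             )
--         else:
--             seen[app_id] = i
--     return errors
-- ===== SOURCE B (Python) =====
-- def check_duplicate_ids(apps):
--     # Pass 1: index table of each id's first occurrence.
--     first_seen = {}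
--     for i, app in enumerate(apps):
--         app_id = app.get("id", f"<missing id at index {i}>")
--         if app_id not in first_seen:
--             first_seen[app_id] = i
--     # Pass 2: emit an error for every occurrence that is not the first one.
--     errors = []
--     for i, app in enumerate(apps):
--         app_id = app.get("id", f"<missing id at index {i}>")
--         j = first_seen[app_id]
--         if j != i:
--             errors.append(
--                 f"Duplicate app ID '{app_id}' at index {i} (first seen at {j})"
--             )
--     return errors
-- ===== Notes on version B (the rewrite author's own statement) =====
-- stated objective: alternative
-- what changed: Replaced the single loop that interleaves building the seen-dict with emitting errors by a two-pass design: first build a first-occurrence index table, then a separate emission pass that flags every position whose id's first occurrence differs from it.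
import Mathlib
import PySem

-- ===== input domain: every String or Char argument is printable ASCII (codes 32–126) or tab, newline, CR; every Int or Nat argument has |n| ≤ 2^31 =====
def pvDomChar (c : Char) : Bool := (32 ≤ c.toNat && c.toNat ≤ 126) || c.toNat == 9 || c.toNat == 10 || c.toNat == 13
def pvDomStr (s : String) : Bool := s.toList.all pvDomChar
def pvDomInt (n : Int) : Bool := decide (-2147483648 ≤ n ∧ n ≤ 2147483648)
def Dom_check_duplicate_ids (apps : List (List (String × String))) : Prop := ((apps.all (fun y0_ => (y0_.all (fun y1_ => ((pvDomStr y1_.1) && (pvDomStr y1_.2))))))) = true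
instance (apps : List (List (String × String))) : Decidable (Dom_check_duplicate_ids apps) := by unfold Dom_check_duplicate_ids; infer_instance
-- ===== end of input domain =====

-- B replaces A's single interleaved loop by two passes (build a first-occurrence index table, then emit);
-- same cost, alternative decomposition. Both ports share the id-default and message formatting helpers.

-- app.get("id", f"<missing id at index {i}>"): first-match lookup in the app dict, index-bearing default
def pvAppId (i : Int) (app : List (String × String)) : String :=
  ((PySem.Dict.mk app).get? "id").getD ("<missing id at index " ++ PySem.Int.toStr i ++ ">")

def pvMsg (app_id : String) (i j : Int) : String :=
  "Duplicate app ID '" ++ app_id ++ "' at index " ++ PySem.Int.toStr i ++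
    " (first seen at " ++ PySem.Int.toStr j ++ ")"

-- ===== PORT A =====
-- A's single for-loop over enumerate(apps) carrying (seen, errors)
def pvALoop : List (List (String × String)) → Int → PySem.Dict String Int → List String → List String
  | [], _, _, errors => errors
  | app :: rest, i, seen, errors =>
    let app_id := pvAppId i app
    match seen.get? app_id with
    | some j => pvALoop rest (i + 1) seen (errors ++ [pvMsg app_id i j])
    | none => pvALoop rest (i + 1) (seen.insert app_id i) errors

def check_duplicate_ids (apps : List (List (String × String))) : List String :=
  pvALoop apps 0 PySem.Dict.empty []

-- ===== PORT B =====
-- B's pass 1: first_seen[app_id] = i only the first time an id is seen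
def pvBBuild : List (List (String × String)) → Int → PySem.Dict String Int → PySem.Dict String Int
  | [], _, d => d
  | app :: rest, i, d =>
    let app_id := pvAppId i app
    if d.contains app_id then pvBBuild rest (i + 1) d
    else pvBBuild rest (i + 1) (d.insert app_id i)

-- B's pass 2: emit for every position that is not its id's first occurrence
-- (first_seen[app_id] always succeeds after pass 1; getD's default is never used)
def pvBEmit (fs : PySem.Dict String Int) : List (List (String × String)) → Int → List String → List String
  | [], _, errors => errors
  | app :: rest, i, errors =>
    let app_id := pvAppId i app
    let j := fs.getD app_id 0
    if j ≠ i then pvBEmit fs rest (i + 1) (errors ++ [pvMsg app_id i j])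
    else pvBEmit fs rest (i + 1) errors

def check_duplicate_ids_alt (apps : List (List (String × String))) : List String :=
  pvBEmit (pvBBuild apps 0 PySem.Dict.empty) apps 0 []

-- ===== PRECONDITION & SPEC =====
def Spec_check_duplicate_ids (apps : List (List (String × String))) (out : List String) : Prop := out = check_duplicate_ids_alt apps
instance (apps : List (List (String × String))) (out : List String) : Decidable (Spec_check_duplicate_ids apps out) := by unfold Spec_check_duplicate_ids; infer_instance

-- ===== CLAIM (what is proved, stated in full; the proofs are below) =====
def Claim_equal_check_duplicate_ids : Prop := ∀ (apps : List (List (String × String))), Dom_check_duplicate_ids apps → Spec_check_duplicate_ids apps (check_duplicate_ids apps)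

-- ===== LEMMAS AND PROOFS =====

-- pass 1 never overwrites: an existing binding survives the rest of the build
theorem pvBBuild_get?_mono (l : List (List (String × String))) (i : Int)
    (d : PySem.Dict String Int) (x : String) (j : Int) (h : d.get? x = some j) :
    (pvBBuild l i d).get? x = some j := by
  induction l generalizing i d with
  | nil => simpa [pvBBuild] using h
  | cons a rest ih =>
    simp only [pvBBuild]
    by_cases hc : d.contains (pvAppId i a)
    · simpa [hc] using ih (i + 1) d h
    · simp only [hc]
      apply ih
      have hne : x ≠ pvAppId i a := by
        intro he
        rw [he] at h
        rw [PySem.Dict.contains_eq_isSome_get?, h] at hc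
        simp at hc
      rw [PySem.Dict.get?_insert_of_ne (hne := hne)]
      exact h

-- main invariant: A's seen-dict after a prefix is the state B's pass 1 continues from,
-- so the interleaved loop equals the emission pass over the completed table
theorem pvLoop_eq (rest : List (List (String × String))) :
    ∀ (i : Int) (seen : PySem.Dict String Int) (errors : List String),
    (∀ x j, seen.get? x = some j → j < i) →
    pvALoop rest i seen errors = pvBEmit (pvBBuild rest i seen) rest i errors := by
  induction rest with
  | nil => intro i seen errors _; simp [pvALoop, pvBEmit]
  | cons app rest ih =>
    intro i seen errors hlt
    simp only [pvALoop, pvBBuild, pvBEmit]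
    cases h : seen.get? (pvAppId i app) with
    | some j =>
      have hc : seen.contains (pvAppId i app) = true := by
        rw [PySem.Dict.contains_eq_isSome_get?, h]; rfl
      have hfs : (pvBBuild rest (i + 1) seen).get? (pvAppId i app) = some j :=
        pvBBuild_get?_mono rest (i + 1) seen _ j h
      have hj : j < i := hlt _ _ h
      simp only [hc, if_true, PySem.Dict.getD_eq_get?_getD, hfs, Option.getD_some]
      have hne : j ≠ i := ne_of_lt hj
      rw [if_pos hne]
      exact ih (i + 1) seen (errors ++ [pvMsg (pvAppId i app) i j])
        (fun x k hk => lt_trans (hlt x k hk) (by omega))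
    | none =>
      have hc : seen.contains (pvAppId i app) = false := by
        rw [PySem.Dict.contains_eq_isSome_get?, h]; rfl
      have hfs : (pvBBuild rest (i + 1) (seen.insert (pvAppId i app) i)).get? (pvAppId i app) = some i :=
        pvBBuild_get?_mono rest (i + 1) _ _ i (PySem.Dict.get?_insert_self _ _ _)
      simp only [hc, Bool.false_eq_true, if_false, PySem.Dict.getD_eq_get?_getD, hfs,
        Option.getD_some, ne_eq, not_true_eq_false, if_false]
      refine ih (i + 1) (seen.insert (pvAppId i app) i) errors ?_
      intro x k hk
      rw [PySem.Dict.get?_insert] at hk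
      split_ifs at hk with hx
      · cases hk; omega
      · exact lt_trans (hlt x k hk) (by omega)

-- ===== VERDICT (by name: the statement is the Claim_ definition above) =====
theorem check_duplicate_ids_spec : Claim_equal_check_duplicate_ids := by
  intro apps _
  show _ = _
  unfold check_duplicate_ids check_duplicate_ids_alt
  exact pvLoop_eq apps 0 PySem.Dict.empty [] (fun x j h => by simp [PySem.Dict.get?_empty] at h)
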